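-- pv_equiv track=rewrite | github.com/sosrtv353/GOA-homeworks | level 48/classwork/classwork.py | points
-- ===== SOURCE A (Python) =====
-- def points(games):
--     total_points = 0
--
--     for game in games:
--         x = game[0]
--         y = game[2]
--
--         if x > y: total_points += 3
--         elif x == y: total_points += 1
--
--     return total_points
-- ===== SOURCE B (Python) =====
-- _SCORE = {1: 3, 0: 1, -1: 0}
--
--
-- def points(games):
--     # histogram of game outcomes by comparison sign, then a table lookup
--     tally = {1: 0, 0: 0, -1: 0}
--     for game in games:
--         x, y = game[0], game[2]
--         tally[(x > y) - (x < y)] += 1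
--     return sum(_SCORE[s] * n for s, n in tally.items())
-- ===== Notes on version B (the rewrite author's own statement) =====
-- stated objective: alternative
-- what changed: Instead of accumulating points in one running total, B builds a histogram (dict) of games keyed by the comparison sign (win/draw/loss) and finishes with a dot product against a score table {1:3, 0:1, -1:0}.
import Mathlib
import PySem

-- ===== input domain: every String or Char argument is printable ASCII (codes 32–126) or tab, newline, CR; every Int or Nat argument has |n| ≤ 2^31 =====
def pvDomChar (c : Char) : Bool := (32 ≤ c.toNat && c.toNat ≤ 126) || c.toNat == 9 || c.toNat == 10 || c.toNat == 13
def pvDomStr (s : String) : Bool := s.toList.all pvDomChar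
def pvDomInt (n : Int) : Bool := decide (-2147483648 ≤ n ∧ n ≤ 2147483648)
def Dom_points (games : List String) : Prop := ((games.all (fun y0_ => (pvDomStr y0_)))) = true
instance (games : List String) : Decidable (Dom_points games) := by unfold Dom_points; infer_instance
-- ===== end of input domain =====

-- B replaces A's running points total with a histogram of games keyed by the comparison sign
-- (win/draw/loss) plus a final dot product against the score table {1:3, 0:1, -1:0}; same value.

-- ===== PORT A =====
def points (games : List String) : Int :=
  games.foldl (fun total_points game =>
    match PySem.Str.pyGet? game 0, PySem.Str.pyGet? game 2 with
    | some x, some y =>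
        if x > y then total_points + 3
        else if x == y then total_points + 1
        else total_points
    | _, _ => total_points) 0

-- ===== PORT B =====
-- module-level constant _SCORE = {1: 3, 0: 1, -1: 0}
def pvSCORE : PySem.Dict Int Int :=
  ((PySem.Dict.empty.insert 1 3).insert 0 1).insert (-1) 0

def points_alt (games : List String) : Int :=
  let tally0 : PySem.Dict Int Int :=
    ((PySem.Dict.empty.insert 1 0).insert 0 0).insert (-1) 0
  let tally := games.foldl (fun t game =>
    match PySem.Str.pyGet? game 0 with
    | none => t
    | some x =>
      match PySem.Str.pyGet? game 2 with
      | none => t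
      | some y =>
        let s : Int := (if x > y then 1 else 0) - (if x < y then 1 else 0)
        -- tally[s] += 1; the key s ∈ {1,0,-1} is always present, so the default is never used
        t.modify s 0 (· + 1)) tally0
  -- sum(_SCORE[s] * n for s, n in tally.items()); every key of tally is in _SCORE,
  -- so the getD default is never used (Python's [] would raise KeyError only on a missing key)
  (tally.items.map (fun p => pvSCORE.getD p.1 0 * p.2)).sum

-- ===== PRECONDITION & SPEC =====
-- Pre_ excludes exactly the inputs on which the Python programs raise IndexError:
-- a game string shorter than 3 characters (game[0] / game[2] out of range).
def Pre_points (games : List String) : Prop := ∀ g ∈ games, 3 ≤ g.length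
instance (games : List String) : Decidable (Pre_points games) := by unfold Pre_points; infer_instance
def pvWitness_points : List String := ["3:1", "2:2", "0:5"]
def Spec_points (games : List String) (out : Int) : Prop := out = points_alt games
instance (games : List String) (out : Int) : Decidable (Spec_points games out) := by unfold Spec_points; infer_instance

-- ===== CLAIM (what is proved, stated in full; the proofs are below) =====
def Claim_equal_points : Prop := ∀ (games : List String), Dom_points games → Pre_points games → Spec_points games (points games)

-- ===== LEMMAS AND PROOFS =====
-- classifiers used only by the proofs
def pvWin (g : String) : Bool :=
  match PySem.Str.pyGet? g 0, PySem.Str.pyGet? g 2 with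
  | some x, some y => x > y
  | _, _ => false

def pvDraw (g : String) : Bool :=
  match PySem.Str.pyGet? g 0, PySem.Str.pyGet? g 2 with
  | some x, some y => x == y
  | _, _ => false

def pvLoss (g : String) : Bool :=
  match PySem.Str.pyGet? g 0, PySem.Str.pyGet? g 2 with
  | some x, some y => x < y
  | _, _ => false

theorem points_foldl (games : List String) : ∀ t : Int,
    games.foldl (fun total_points game =>
      match PySem.Str.pyGet? game 0, PySem.Str.pyGet? game 2 with
      | some x, some y =>
          if x > y then total_points + 3
          else if x == y then total_points + 1
          else total_points
      | _, _ => total_points) t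
    = t + 3 * (games.countP pvWin : Int) + (games.countP pvDraw : Int) := by
  induction games with
  | nil => intro t; simp
  | cons g gs ih =>
    intro t
    rw [List.foldl_cons, ih, List.countP_cons, List.countP_cons]
    unfold pvWin pvDraw
    cases h0 : PySem.Str.pyGet? g 0 with
    | none => simp
    | some x =>
      cases h2 : PySem.Str.pyGet? g 2 with
      | none => simp
      | some y =>
        by_cases hgt : x > y
        · have hne : ¬ (x == y) = true := by simpa using ne_of_gt hgt
          simp [hgt, hne]; ring
        · by_cases heq : (x == y) = true
          · simp [hgt, heq]; ring
          · simp [hgt, heq]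

theorem pvModify_neg1 (a b c : Int) :
    (PySem.Dict.mk [(1, a), (0, b), (-1, c)] : PySem.Dict Int Int).modify (-1) 0 (· + 1)
      = PySem.Dict.mk [(1, a), (0, b), (-1, c + 1)] := by
  simp [PySem.Dict.modify, PySem.Dict.insert, PySem.Dict.getD, PySem.Dict.get?, PySem.Dict.contains]

theorem pvModify_zero (a b c : Int) :
    (PySem.Dict.mk [(1, a), (0, b), (-1, c)] : PySem.Dict Int Int).modify 0 0 (· + 1)
      = PySem.Dict.mk [(1, a), (0, b + 1), (-1, c)] := by
  simp [PySem.Dict.modify, PySem.Dict.insert, PySem.Dict.getD, PySem.Dict.get?, PySem.Dict.contains]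

theorem pvModify_one (a b c : Int) :
    (PySem.Dict.mk [(1, a), (0, b), (-1, c)] : PySem.Dict Int Int).modify 1 0 (· + 1)
      = PySem.Dict.mk [(1, a + 1), (0, b), (-1, c)] := by
  simp [PySem.Dict.modify, PySem.Dict.insert, PySem.Dict.getD, PySem.Dict.get?, PySem.Dict.contains]

theorem alt_fold (games : List String) : ∀ a b c : Int,
    games.foldl (fun t game =>
      match PySem.Str.pyGet? game 0 with
      | none => t
      | some x =>
        match PySem.Str.pyGet? game 2 with
        | none => t
        | some y =>
          let s : Int := (if x > y then 1 else 0) - (if x < y then 1 else 0)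
          t.modify s 0 (· + 1)) (PySem.Dict.mk [(1, a), (0, b), (-1, c)])
    = PySem.Dict.mk [(1, a + games.countP pvWin), (0, b + games.countP pvDraw),
        (-1, c + games.countP pvLoss)] := by
  induction games with
  | nil => intro a b c; simp
  | cons g gs ih =>
    intro a b c
    rw [List.foldl_cons, List.countP_cons, List.countP_cons, List.countP_cons]
    cases h0 : PySem.Str.pyGet? g 0 with
    | none =>
      have hw : pvWin g = false := by
        unfold pvWin; rw [h0]
      have hd : pvDraw g = false := by
        unfold pvDraw; rw [h0]
      have hl : pvLoss g = false := by
        unfold pvLoss; rw [h0]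
      simp only [h0]
      rw [ih]
      simp [hw, hd, hl]
    | some x =>
      cases h2 : PySem.Str.pyGet? g 2 with
      | none =>
        have hw : pvWin g = false := by unfold pvWin; rw [h0, h2]
        have hd : pvDraw g = false := by unfold pvDraw; rw [h0, h2]
        have hl : pvLoss g = false := by unfold pvLoss; rw [h0, h2]
        simp only [h0, h2]
        rw [ih]
        simp [hw, hd, hl]
      | some y =>
        simp only [h0, h2]
        rcases lt_trichotomy x y with hlt | heqc | hgt
        · have h1 : ¬ x > y := not_lt_of_gt hlt
          have hw : pvWin g = false := by unfold pvWin; rw [h0, h2]; simp [h1]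
          have hd : pvDraw g = false := by
            unfold pvDraw; rw [h0, h2]; simp; exact ne_of_lt hlt
          have hl : pvLoss g = true := by unfold pvLoss; rw [h0, h2]; simp [hlt]
          have hstep : ((if x > y then (1:Int) else 0) - (if x < y then 1 else 0)) = -1 := by
            simp [h1, hlt]
          simp only [hstep, pvModify_neg1]
          rw [ih]
          simp [hw, hd, hl]; ring
        · subst heqc
          have h1 : ¬ x > x := lt_irrefl x
          have hw : pvWin g = false := by unfold pvWin; rw [h0, h2]; simp
          have hd : pvDraw g = true := by unfold pvDraw; rw [h0, h2]; simp
          have hl : pvLoss g = false := by unfold pvLoss; rw [h0, h2]; simp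
          have hstep : ((if x > x then (1:Int) else 0) - (if x < x then 1 else 0)) = 0 := by
            simp [h1]
          simp only [hstep, pvModify_zero]
          rw [ih]
          simp [hw, hd, hl]; ring
        · have h3 : ¬ x < y := not_lt_of_gt hgt
          have hw : pvWin g = true := by unfold pvWin; rw [h0, h2]; simp [hgt]
          have hd : pvDraw g = false := by
            unfold pvDraw; rw [h0, h2]; simp; exact ne_of_gt hgt
          have hl : pvLoss g = false := by unfold pvLoss; rw [h0, h2]; simp [h3]
          have hstep : ((if x > y then (1:Int) else 0) - (if x < y then 1 else 0)) = 1 := by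
            simp [hgt, h3]
          simp only [hstep, pvModify_one]
          rw [ih]
          simp [hw, hd, hl]; ring

-- ===== VERDICT (by name: the statement is the Claim_ definition above) =====
theorem points_spec : Claim_equal_points := by
  intro games _ _
  unfold Spec_points points points_alt
  rw [points_foldl games 0]
  simp only [show (((PySem.Dict.empty.insert 1 0).insert 0 0).insert (-1) 0 : PySem.Dict Int Int)
      = PySem.Dict.mk [(1, 0), (0, 0), (-1, 0)] from by decide]
  rw [alt_fold games 0 0 0]
  simp [PySem.Dict.items,
    show (pvSCORE.getD 1 0 : Int) = 3 from by decide,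
    show (pvSCORE.getD 0 0 : Int) = 1 from by decide,
    show (pvSCORE.getD (-1) 0 : Int) = 0 from by decide]
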